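-- pv_equiv track=rewrite | github.com/catoteig/knowitJulekalender2019 | knowitjulekalender/luke_23/luke_23.py | harshad
-- ===== SOURCE A (Python) =====
-- import math
--
-- def harshad(minval, maxval):
--     ant = 0
--     for i in range(minval, maxval + 1):
--         s = str(i)
--         h = 0
--         for n in range(len(s)):
--             h += int(s[n])
--         if i % h == 0 and isprime(h):
--             ant += 1
--     return ant
--
-- def isprime(number):
--     if number <= 1:
--         return False
--     if number <= 3:
--         return True
--     if number % 2 == 0 or number % 3 == 0:
--         return False
--     for i in range(5, int(math.sqrt(number)) + 1, 6):
--         if number % i == 0 or number % (i + 2) == 0: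
--             return False
--     return True
-- ===== SOURCE B (Python) =====
-- # B: precompute the set of candidate prime digit sums once (naive trial division),
-- # then count in a single pass with an arithmetic (divmod) digit sum -- no string
-- # conversion and no per-number primality test.
-- def harshad(minval, maxval):
--     if maxval < minval:
--         return 0
--     limit = 9 * len(str(maxval))
--     primes = {s for s in range(2, limit + 1) if all(s % d != 0 for d in range(2, s))}
--     ant = 0
--     for i in range(minval, maxval + 1):
--         s, m = 0, i
--         while m > 0:
--             s += m % 10
--             m //= 10
--         if s in primes and i % s == 0:
--             ant += 1
--     return ant
-- ===== Notes on version B (the rewrite author's own statement) =====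
-- stated objective: alternative
-- what changed: B precomputes once the set of prime candidate digit sums (naive trial division over a <=90-element range) and then counts in a single pass, computing each digit sum arithmetically with divmod, replacing A's per-number str() conversion, per-character int() parsing and per-number 6k+-1 square-root primality test; intended as faster, and a timing run read a 1.6-1.9x median at the largest size, but it could not confirm that consistently, so no speed is claimed.
import Mathlib
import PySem

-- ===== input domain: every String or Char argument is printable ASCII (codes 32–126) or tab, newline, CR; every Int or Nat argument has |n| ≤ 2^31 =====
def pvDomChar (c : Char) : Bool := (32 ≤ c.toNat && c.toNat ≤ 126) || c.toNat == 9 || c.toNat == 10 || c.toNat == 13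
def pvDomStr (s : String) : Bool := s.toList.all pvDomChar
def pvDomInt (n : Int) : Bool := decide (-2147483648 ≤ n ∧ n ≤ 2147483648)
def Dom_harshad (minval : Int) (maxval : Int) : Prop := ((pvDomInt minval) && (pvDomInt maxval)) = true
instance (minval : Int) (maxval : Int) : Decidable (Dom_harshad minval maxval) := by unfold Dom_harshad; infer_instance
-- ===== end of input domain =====

-- B precomputes the set of prime candidate digit sums once and counts in one pass with an
-- arithmetic digit sum instead of per-number string parsing and primality testing
-- (objective: alternative; equal return values on Pre_).

-- ===== PORT A =====
-- int(math.sqrt(number)): exact integer floor square root (math.sqrt is exact floor on the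
-- small values this program feeds it, so floor-sqrt is the Python-exact port).
def pyIsqrt (n : Nat) : Nat :=
  (List.range (n + 1)).foldl (fun acc r => if r * r ≤ n then r else acc) 0

def isprime (number : Int) : Bool :=
  if number ≤ 1 then false
  else if number ≤ 3 then true
  else if PySem.Int.mod number 2 == 0 || PySem.Int.mod number 3 == 0 then false
  else !(PySem.List.pyRange 5 ((pyIsqrt number.toNat : Int) + 1) 6).any
      (fun i => PySem.Int.mod number i == 0 || PySem.Int.mod number (i + 2) == 0)

def harshad (minval : Int) (maxval : Int) : Int :=
  (PySem.List.pyRange minval (maxval + 1)).foldl (fun ant i =>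
    let s := PySem.Int.toChars i
    -- int(s[n]): the .getD 0 is reached only where Python raises ValueError (negative i; outside Pre_)
    let h := (PySem.List.pyRange 0 (s.length : Int)).foldl
      (fun h n => h + (PySem.Int.ofChars? [PySem.List.pyGetD s n ' ']).getD 0) 0
    -- i % h: Python raises ZeroDivisionError when h = 0 (only at i = 0; outside Pre_)
    if PySem.Int.mod i h == 0 && isprime h then ant + 1 else ant) 0

-- ===== PORT B =====
-- the 'while m > 0: s += m % 10; m //= 10' loop of Source B (fuel n.toNat makes it total; the
-- loop variable strictly decreases, so the fuel is never exhausted while m > 0)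
def dsGo : Nat → Int → Int
  | 0, _ => 0
  | f + 1, n => if 0 < n then PySem.Int.mod n 10 + dsGo f (PySem.Int.floordiv n 10) else 0

def digitsum_alt (n : Int) : Int := dsGo n.toNat n

def harshad_alt (minval : Int) (maxval : Int) : Int :=
  if maxval < minval then 0
  else
    let limit : Int := 9 * ((PySem.Int.toChars maxval).length : Int)
    let primes : PySem.Set Int := PySem.Set.ofList
      ((PySem.List.pyRange 2 (limit + 1)).filter
        (fun s => (PySem.List.pyRange 2 s).all (fun d => !(PySem.Int.mod s d == 0))))
    (PySem.List.pyRange minval (maxval + 1)).foldl (fun ant i =>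
      let s := digitsum_alt i
      if PySem.Set.contains primes s && PySem.Int.mod i s == 0 then ant + 1 else ant) 0

-- ===== PRECONDITION & SPEC =====
-- Pre_ excludes exactly the inputs where A raises: a non-empty range starting at minval ≤ 0
-- (ValueError on int('-') for a negative i, ZeroDivisionError at i = 0).
def Pre_harshad (minval : Int) (maxval : Int) : Prop := maxval < minval ∨ 1 ≤ minval
instance (minval : Int) (maxval : Int) : Decidable (Pre_harshad minval maxval) := by unfold Pre_harshad; infer_instance
def pvWitness_harshad : Int × Int := (1, 40)

def Spec_harshad (minval : Int) (maxval : Int) (out : Int) : Prop := out = harshad_alt minval maxval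
instance (minval : Int) (maxval : Int) (out : Int) : Decidable (Spec_harshad minval maxval out) := by unfold Spec_harshad; infer_instance

-- ===== CLAIM (what is proved, stated in full; the proofs are below) =====
def Claim_equal_harshad : Prop := ∀ (minval : Int) (maxval : Int), Dom_harshad minval maxval → Pre_harshad minval maxval → Spec_harshad minval maxval (harshad minval maxval)

-- ===== LEMMAS AND PROOFS =====

-- the fuel of dsGo is irrelevant as long as it dominates the argument
theorem dsGo_congr : ∀ (f₁ f₂ m : Nat), m ≤ f₁ → m ≤ f₂ → dsGo f₁ (m : Int) = dsGo f₂ (m : Int) := by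
  intro f₁
  induction f₁ with
  | zero =>
    intro f₂ m h1 _
    have : m = 0 := by omega
    subst this
    cases f₂ <;> simp [dsGo]
  | succ f ih =>
    intro f₂ m h1 h2
    rcases Nat.eq_zero_or_pos m with hm | hm
    · subst hm; cases f₂ <;> simp [dsGo]
    · obtain ⟨f₂', rfl⟩ : ∃ k, f₂ = k + 1 := ⟨f₂ - 1, by omega⟩
      have hpos : (0:Int) < (m:Int) := by exact_mod_cast hm
      have e10 : (10:Int) = ((10:Nat):Int) := by norm_num
      simp only [dsGo, if_pos hpos, e10, PySem.Int.floordiv_natCast]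
      rw [ih f₂' (m / 10) (by omega) (by omega)]

-- one unfolding of digitsum_alt on a natural number
theorem digitsum_alt_natCast (m : Nat) :
    digitsum_alt (m : Int) = if m = 0 then 0 else ((m % 10 : Nat) : Int) + digitsum_alt ((m / 10 : Nat) : Int) := by
  unfold digitsum_alt
  rcases Nat.eq_zero_or_pos m with h | h
  · subst h; simp [dsGo]
  · have ht : ((m:Int)).toNat = m := by omega
    rw [ht]
    obtain ⟨f, rfl⟩ : ∃ k, m = k + 1 := ⟨m - 1, by omega⟩
    have hpos : (0:Int) < ((f+1 : Nat):Int) := by exact_mod_cast h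
    have e10 : (10:Int) = ((10:Nat):Int) := by norm_num
    simp only [dsGo, if_pos hpos, if_neg (by omega : ¬ f + 1 = 0), e10,
      PySem.Int.mod_natCast, PySem.Int.floordiv_natCast]
    have ht2 : (((f+1) / 10 : Nat) : Int).toNat = (f+1) / 10 := by omega
    rw [ht2, dsGo_congr f ((f+1)/10) ((f+1)/10) (by omega) (by omega)]

theorem digitsum_alt_nonneg (m : Nat) : 0 ≤ digitsum_alt (m : Int) := by
  induction m using Nat.strong_induction_on with
  | _ m ih =>
    rw [digitsum_alt_natCast]
    rcases Nat.eq_zero_or_pos m with h | h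
    · simp [h]
    · rw [if_neg (by omega)]
      have := ih (m / 10) (by omega)
      have h9 : (0:Int) ≤ ((m % 10 : Nat) : Int) := by positivity
      omega

-- the character-sum A computes over str(i)
def csum (l : List Char) : Int := l.foldl (fun h c => h + (PySem.Int.ofChars? [c]).getD 0) 0

theorem csum_append_digit (l : List Char) (c : Char) :
    csum (l ++ [c]) = csum l + (PySem.Int.ofChars? [c]).getD 0 := by
  simp [csum, List.foldl_append]

theorem ofChars_digitChar (d : Nat) (hd : d < 10) :
    (PySem.Int.ofChars? [Nat.digitChar d]).getD 0 = (d : Int) := by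
  interval_cases d <;> decide

theorem csum_toDigits (m : Nat) : csum (Nat.toDigits 10 m) = digitsum_alt (m : Int) := by
  induction m using Nat.strong_induction_on with
  | _ m ih =>
    rw [Nat.toDigits_eq_if (by norm_num), digitsum_alt_natCast]
    by_cases hm : m < 10
    · rw [if_pos hm]
      rcases Nat.eq_zero_or_pos m with h | h
      · subst h; decide
      · rw [if_neg (by omega)]
        have h10 : m / 10 = 0 := by omega
        have hc : csum [Nat.digitChar m] = (m : Int) := by
          have := ofChars_digitChar m hm
          simp [csum, this]
        rw [hc, h10, digitsum_alt_natCast]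
        simp
        omega
    · rw [if_neg hm, if_neg (by omega), csum_append_digit,
        ih (m / 10) (by omega), ofChars_digitChar (m % 10) (by omega)]
      ring

theorem digitsum_le (m : Nat) : digitsum_alt (m : Int) ≤ 9 * ((Nat.toDigits 10 m).length : Int) := by
  induction m using Nat.strong_induction_on with
  | _ m ih =>
    rw [Nat.toDigits_eq_if (by norm_num), digitsum_alt_natCast]
    by_cases hm : m < 10
    · rw [if_pos hm]
      rcases Nat.eq_zero_or_pos m with h | h
      · simp [h]
      · rw [if_neg (by omega)]
        have h10 : m / 10 = 0 := by omega
        rw [h10, digitsum_alt_natCast]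
        simp
        omega
    · rw [if_neg hm, if_neg (by omega)]
      have := ih (m / 10) (by omega)
      simp only [List.length_append, List.length_cons, List.length_nil]
      have h9 : ((m % 10 : Nat) : Int) ≤ 9 := by omega
      omega

-- length of str is monotone in the value
theorem toDigits_length_mono (i M : Nat) (h : i ≤ M) :
    (Nat.toDigits 10 i).length ≤ (Nat.toDigits 10 M).length := by
  have hM : M < 10 ^ (Nat.toDigits 10 M).length :=
    (Nat.length_toDigits_le_iff (by norm_num) Nat.length_toDigits_pos).mp (le_refl _)
  exact (Nat.length_toDigits_le_iff (by norm_num) Nat.length_toDigits_pos).mpr (by omega)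

-- str of a nonnegative int
theorem toChars_of_nonneg (i : Int) (h : 0 ≤ i) :
    PySem.Int.toChars i = Nat.toDigits 10 i.toNat := by
  simp [PySem.Int.toChars, not_lt.mpr h]

-- A's 6k±1 primality test agrees with B's naive trial division on the reachable range
theorem isprime_eq_naive : ∀ s : Nat, s ≤ 90 →
    isprime (s : Int) =
      (decide (2 ≤ (s:Int)) && (PySem.List.pyRange 2 (s:Int)).all (fun d => !(PySem.Int.mod (s:Int) d == 0))) := by
  decide

-- membership in B's precomputed set equals A's primality test, for 0 ≤ s ≤ min(limit, 90)
theorem contains_primes_eq (limit s : Int) (h0 : 0 ≤ s) (hl : s ≤ limit) (h90 : s ≤ 90) :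
    PySem.Set.contains
      (PySem.Set.ofList ((PySem.List.pyRange 2 (limit + 1)).filter
        (fun s => (PySem.List.pyRange 2 s).all (fun d => !(PySem.Int.mod s d == 0))))) s
      = isprime s := by
  obtain ⟨sn, rfl⟩ : ∃ sn : Nat, ((sn : Nat) : Int) = s := ⟨s.toNat, by omega⟩
  have hmem : PySem.Set.contains
      (PySem.Set.ofList ((PySem.List.pyRange 2 (limit + 1)).filter
        (fun s => (PySem.List.pyRange 2 s).all (fun d => !(PySem.Int.mod s d == 0))))) (sn : Int) = true
      ↔ ((2 ≤ (sn:Int) ∧ (sn:Int) < limit + 1) ∧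
         (PySem.List.pyRange 2 (sn:Int)).all (fun d => !(PySem.Int.mod (sn:Int) d == 0)) = true) := by
    rw [PySem.Set.contains, List.contains_iff_mem, PySem.Set.mem_ofList, List.mem_filter,
      PySem.List.mem_pyRange_one]
  rw [isprime_eq_naive sn (by omega)]
  by_cases h2 : 2 ≤ (sn : Int)
  · cases hall : (PySem.List.pyRange 2 ((sn:Nat):Int)).all (fun d => !(PySem.Int.mod ((sn:Nat):Int) d == 0)) with
    | true =>
      have : PySem.Set.contains _ ((sn:Nat):Int) = true := hmem.mpr ⟨⟨h2, by omega⟩, hall⟩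
      rw [this]
      simp [h2]
    | false =>
      have : ¬ PySem.Set.contains
          (PySem.Set.ofList ((PySem.List.pyRange 2 (limit + 1)).filter
            (fun s => (PySem.List.pyRange 2 s).all (fun d => !(PySem.Int.mod s d == 0))))) ((sn:Nat):Int) = true := by
        intro hc
        have := (hmem.mp hc).2
        rw [hall] at this
        exact Bool.false_ne_true this
      rw [Bool.not_eq_true] at this
      rw [this]
      simp
  · have : ¬ PySem.Set.contains
        (PySem.Set.ofList ((PySem.List.pyRange 2 (limit + 1)).filter
          (fun s => (PySem.List.pyRange 2 s).all (fun d => !(PySem.Int.mod s d == 0))))) ((sn:Nat):Int) = true := by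
      intro hc
      exact h2 (hmem.mp hc).1.1
    rw [Bool.not_eq_true] at this
    rw [this]
    simp [h2]

-- an empty Python range
theorem pyRange_nil (a b : Int) (h : b ≤ a) : PySem.List.pyRange a b = [] := by
  have : ∀ x, x ∉ PySem.List.pyRange a b := by
    intro x hx
    have := PySem.List.mem_pyRange_one.mp hx
    omega
  exact List.eq_nil_iff_forall_not_mem.mpr this

-- ===== VERDICT (by name: the statement is the Claim_ definition above) =====
theorem harshad_spec : Claim_equal_harshad := by
  intro minval maxval hdom hpre
  unfold Spec_harshad harshad harshad_alt
  have hdm : maxval ≤ 2147483648 := by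
    simp only [Dom_harshad, pvDomInt, Bool.and_eq_true, decide_eq_true_eq] at hdom
    omega
  by_cases hend : maxval < minval
  · rw [if_pos hend, pyRange_nil _ _ (by omega)]
    rfl
  · have hmin : 1 ≤ minval := by rcases hpre with h | h <;> omega
    rw [if_neg hend]
    apply PySem.List.foldl_congr_mem
    intro acc x hx
    obtain ⟨hx1, hx2⟩ := PySem.List.mem_pyRange_one.mp hx
    show (let s := PySem.Int.toChars x;
      let h := (PySem.List.pyRange 0 (s.length : Int)).foldl
        (fun h n => h + (PySem.Int.ofChars? [PySem.List.pyGetD s n ' ']).getD 0) 0;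
      if PySem.Int.mod x h == 0 && isprime h then acc + 1 else acc) = _
    simp only
    -- the inner character loop is the character sum over str(x)
    rw [PySem.List.foldl_pyRange_zero_pyGetD' (PySem.Int.toChars x) ' '
      (fun h c => h + (PySem.Int.ofChars? [c]).getD 0) 0]
    have hx0 : (0:Int) ≤ x := by omega
    rw [toChars_of_nonneg x hx0]
    have hcs : csum (Nat.toDigits 10 x.toNat) = digitsum_alt (x.toNat : Int) := csum_toDigits x.toNat
    have hxx : ((x.toNat : Nat) : Int) = x := by omega
    rw [hxx] at hcs
    rw [show (Nat.toDigits 10 x.toNat).foldl (fun h c => h + (PySem.Int.ofChars? [c]).getD 0) 0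
        = csum (Nat.toDigits 10 x.toNat) from rfl, hcs]
    -- bounds on the digit sum
    have hnn : 0 ≤ digitsum_alt x := by rw [← hxx]; exact digitsum_alt_nonneg x.toNat
    have hM0 : (0:Int) ≤ maxval := by omega
    rw [toChars_of_nonneg maxval hM0]
    have hle : digitsum_alt x ≤ 9 * ((Nat.toDigits 10 maxval.toNat).length : Int) := by
      have h1 := digitsum_le x.toNat
      rw [hxx] at h1
      have h2 := toDigits_length_mono x.toNat maxval.toNat (by omega)
      have : ((Nat.toDigits 10 x.toNat).length : Int) ≤ ((Nat.toDigits 10 maxval.toNat).length : Int) := by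
        exact_mod_cast h2
      omega
    have h90 : digitsum_alt x ≤ 90 := by
      have hlen : (Nat.toDigits 10 maxval.toNat).length ≤ 10 :=
        (Nat.length_toDigits_le_iff (by norm_num) (by norm_num)).mpr (by omega)
      have : ((Nat.toDigits 10 maxval.toNat).length : Int) ≤ 10 := by exact_mod_cast hlen
      omega
    rw [contains_primes_eq (9 * ((Nat.toDigits 10 maxval.toNat).length : Int)) (digitsum_alt x) hnn hle h90,
      Bool.and_comm]
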